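-- pv_equiv track=rewrite | github.com/AlexandrSech/Z63-TMS | students/aliakseyenkamikhail/HW/task_6.py | index_min_sum_column
-- ===== SOURCE A (Python) =====
-- def index_min_sum_column(matrix, rows): # нахожу индекс столбца с минимальной суммой
--     index_min_sum_column = 0
--     min_sum_column = 1000000
--     sum_column = 0
--     for i in range(len(matrix)):
--         column = []
--
--         for j in range(len(matrix)):
--             column.append(matrix[j][i])
--         if len(column) == rows:
--             sum_column = sum(column)
--             if sum_column < min_sum_column:
--                 min_sum_column = sum_column
--                 index_min_sum_column = i
--     return index_min_sum_column, min_sum_column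
-- ===== SOURCE B (Python) =====
-- def index_min_sum_column(matrix, rows):
--     n = len(matrix)
--     sums = [0] * n
--     for row in matrix:
--         sums = [s + row[i] for i, s in enumerate(sums)]
--     idx, min_sum = 0, 1000000
--     if n == rows:
--         for i, s in enumerate(sums):
--             if s < min_sum:
--                 idx, min_sum = i, s
--     return idx, min_sum
-- ===== Notes on version B (the rewrite author's own statement) =====
-- stated objective: alternative
-- what changed: A rebuilds each column as a fresh list with an inner index scan and tests the len(column)==rows gate once per column; B accumulates all column sums in one row-major pass over the matrix rows, then does a single selection scan behind one gate test.
import Mathlib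
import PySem

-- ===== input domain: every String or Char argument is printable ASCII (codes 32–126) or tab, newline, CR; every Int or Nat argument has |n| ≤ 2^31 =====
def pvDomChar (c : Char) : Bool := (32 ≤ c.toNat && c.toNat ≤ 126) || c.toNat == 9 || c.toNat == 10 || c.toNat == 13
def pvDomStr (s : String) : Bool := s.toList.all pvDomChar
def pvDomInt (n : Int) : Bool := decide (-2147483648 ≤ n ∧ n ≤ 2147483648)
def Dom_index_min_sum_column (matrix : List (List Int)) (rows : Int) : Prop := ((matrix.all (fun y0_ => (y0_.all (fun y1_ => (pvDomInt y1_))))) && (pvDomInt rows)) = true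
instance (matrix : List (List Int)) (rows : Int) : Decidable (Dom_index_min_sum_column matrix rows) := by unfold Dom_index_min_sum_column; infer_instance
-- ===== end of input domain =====

-- B replaces A's per-column list building (one inner scan per column) with a single row-major
-- accumulation of all column sums, then one selection scan: simpler, one gate test instead of n.

-- ===== PORT A =====
def index_min_sum_column (matrix : List (List Int)) (rows : Int) : Int × Int :=
  let n : Int := matrix.length
  let st :=
    (PySem.List.pyRange 0 n 1).foldl (fun (st : Int × Int × Int) i =>
      let column :=
        (PySem.List.pyRange 0 n 1).foldl
          (fun col j => col ++ [PySem.List.pyGetD (PySem.List.pyGetD matrix j []) i 0]) []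
      if (column.length : Int) = rows then
        let s := column.sum
        if s < st.2.1 then (i, s, s) else (st.1, st.2.1, s)
      else st) (0, 1000000, 0)
  (st.1, st.2.1)

-- ===== PORT B =====
def index_min_sum_column_alt (matrix : List (List Int)) (rows : Int) : Int × Int :=
  let n : Int := matrix.length
  let sums :=
    matrix.foldl
      (fun sums row =>
        (PySem.List.enumerate sums 0).map (fun p => p.2 + PySem.List.pyGetD row p.1 0))
      (List.replicate matrix.length 0)
  if n = rows then
    (PySem.List.enumerate sums 0).foldl
      (fun (st : Int × Int) p => if p.2 < st.2 then (p.1, p.2) else st)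
      ((0 : Int), (1000000 : Int))
  else (0, 1000000)

-- ===== PRECONDITION & SPEC =====
-- Pre_ excludes exactly the inputs where Python A raises IndexError: some row shorter than len(matrix).
def Pre_index_min_sum_column (matrix : List (List Int)) (rows : Int) : Prop :=
  ∀ row ∈ matrix, matrix.length ≤ row.length
instance (matrix : List (List Int)) (rows : Int) : Decidable (Pre_index_min_sum_column matrix rows) := by unfold Pre_index_min_sum_column; infer_instance
def pvWitness_index_min_sum_column : List (List Int) × Int := ([[1, 2], [3, 4]], 2)

def Spec_index_min_sum_column (matrix : List (List Int)) (rows : Int) (out : Int × Int) : Prop := out = index_min_sum_column_alt matrix rows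
instance (matrix : List (List Int)) (rows : Int) (out : Int × Int) : Decidable (Spec_index_min_sum_column matrix rows out) := by unfold Spec_index_min_sum_column; infer_instance

-- ===== CLAIM (what is proved, stated in full; the proofs are below) =====
def Claim_equal_index_min_sum_column : Prop := ∀ (matrix : List (List Int)) (rows : Int), Dom_index_min_sum_column matrix rows → Pre_index_min_sum_column matrix rows → Spec_index_min_sum_column matrix rows (index_min_sum_column matrix rows)

-- ===== LEMMAS AND PROOFS =====

-- the shared column-sum value: sum over the rows of row[i] (default 0 out of range)
def colS (matrix : List (List Int)) (i : Int) : Int :=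
  (matrix.map (fun row => PySem.List.pyGetD row i 0)).sum

theorem colS_cons (row : List Int) (ms : List (List Int)) (i : Int) :
    colS (row :: ms) i = PySem.List.pyGetD row i 0 + colS ms i := by
  simp [colS]

theorem enum_map_enum {a b : Type} (g : Int × a → b) :
    ∀ (l : List a) (s : Int),
      PySem.List.enumerate ((PySem.List.enumerate l s).map g) s
        = (PySem.List.enumerate l s).map (fun p => (p.1, g p))
  | [], s => by simp [PySem.List.enumerate_nil]
  | x :: xs, s => by
      simp [PySem.List.enumerate_cons, enum_map_enum g xs (s + 1)]

-- B's accumulation loop, fully general in the starting sums list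
theorem acc_inv :
    ∀ (ms : List (List Int)) (sums : List Int),
      ms.foldl
        (fun sums row =>
          (PySem.List.enumerate sums 0).map (fun p => p.2 + PySem.List.pyGetD row p.1 0))
        sums
      = (PySem.List.enumerate sums 0).map (fun p => p.2 + colS ms p.1)
  | [], sums => by
      simp only [List.foldl_nil, colS, List.map_nil, List.sum_nil, add_zero]
      exact (PySem.List.map_snd_enumerate sums 0).symm
  | row :: ms, sums => by
      rw [List.foldl_cons, acc_inv ms, enum_map_enum]
      rw [List.map_map]
      exact List.map_congr_left (fun p _ => by simp [colS_cons]; ring)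

theorem pyGetD_replicate (n : Nat) (j : Int) :
    PySem.List.pyGetD (List.replicate n (0 : Int)) j 0 = 0 := by
  simp [PySem.List.pyGetD, PySem.List.pyGet?, PySem.List.pyIdx?]
  split_ifs <;> simp [List.getElem?_replicate] <;> split_ifs <;> simp

-- projecting A's 3-component state fold to B's 2-component one
theorem fold_proj (f : Int → Int) :
    ∀ (l : List Int) (p : Int × Int) (s : Int),
      ((l.foldl (fun (st : Int × Int × Int) i =>
          if f i < st.2.1 then (i, f i, f i) else (st.1, st.2.1, f i)) (p.1, p.2, s)).1,
       (l.foldl (fun (st : Int × Int × Int) i =>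
          if f i < st.2.1 then (i, f i, f i) else (st.1, st.2.1, f i)) (p.1, p.2, s)).2.1)
      = l.foldl (fun (st : Int × Int) i => if f i < st.2 then (i, f i) else st) p
  | [], p, s => by simp
  | i :: l, p, s => by
      simp only [List.foldl_cons]
      by_cases h : f i < p.2
      · simpa [h] using fold_proj f l (i, f i) (f i)
      · simpa [h] using fold_proj f l p (f i)

theorem column_eq (matrix : List (List Int)) (i : Int) :
    (PySem.List.pyRange 0 (matrix.length : Int) 1).foldl
      (fun col j => col ++ [PySem.List.pyGetD (PySem.List.pyGetD matrix j []) i 0]) []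
    = matrix.map (fun row => PySem.List.pyGetD row i 0) := by
  have h := PySem.List.foldl_pyRange_zero_pyGetD
    (f := fun (col : List Int) (row : List Int) => col ++ [PySem.List.pyGetD row i 0])
    (xs := matrix) (d := []) (init := [])
  simp only [PySem.List.len] at h
  rw [h, PySem.List.foldl_append_singleton_eq_map, List.nil_append]

theorem sums_eq (matrix : List (List Int)) :
    matrix.foldl
      (fun sums row =>
        (PySem.List.enumerate sums 0).map (fun p => p.2 + PySem.List.pyGetD row p.1 0))
      (List.replicate matrix.length 0)
    = (PySem.List.pyRange 0 (matrix.length : Int) 1).map (fun i => colS matrix i) := by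
  rw [acc_inv]
  rw [PySem.List.enumerate_eq_map_pyRange (d := 0)]
  simp only [List.map_map, List.length_replicate, PySem.List.len]
  exact List.map_congr_left (fun j _ => by simp [pyGetD_replicate])

-- ===== VERDICT (by name: the statement is the Claim_ definition above) =====
theorem index_min_sum_column_spec : Claim_equal_index_min_sum_column := by
  intro matrix rows _ _
  unfold Spec_index_min_sum_column index_min_sum_column index_min_sum_column_alt
  simp only [column_eq, sums_eq, List.length_map]
  by_cases hg : (matrix.length : Int) = rows
  · subst hg
    rw [if_pos rfl]
    rw [PySem.List.enumerate_eq_map_pyRange (d := 0)]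
    rw [List.foldl_map]
    simp only [PySem.List.len, List.length_map, PySem.List.length_pyRange_one,
      Int.sub_zero, Int.toNat_natCast]
    rw [PySem.List.foldl_congr_mem _ _
      (fun (st : Int × Int) i => if colS matrix i < st.2 then (i, colS matrix i) else st) _
      (fun acc x hx => by
        rcases PySem.List.mem_pyRange_one.mp hx with ⟨h0, hn⟩
        rw [PySem.List.pyGetD_map_pyRange_of_nonneg _ _ _ _ h0 hn])]
    exact fold_proj (colS matrix) _ (0, 1000000) 0
  · simp [hg]
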